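-- pv_equiv track=rewrite | github.com/Humble613/PDF-Read | main.py | getCells
-- ===== SOURCE A (Python) =====
-- cell_height = 160
--
-- consignee_width = 435
--
-- pro_num_width = 320
--
-- def getCells(Cy_list, Cx_list, all_text, consignee_x, consignee_y, props="consignee"):
--     minY, maxY = consignee_y, consignee_y+cell_height-10
--     if props == "pronumber":
--         minX_2 = consignee_x-100+consignee_width
--         maxX_2 = minX_2 + pro_num_width
--     else:
--         minX_2, maxX_2 = consignee_x-100, consignee_x-100+consignee_width
--     filtered_elements_index = [k for k, x in enumerate(Cy_list) if x > minY and x < maxY]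
--     Cy_list_1, Cx_list_1, all_text_1 = [], [], []
--     for k in filtered_elements_index:
--         Cy_list_1.append(Cy_list[k])
--         Cx_list_1.append(Cx_list[k])
--         all_text_1.append(all_text[k])
--     filtered_elements_index = [k for k, x in enumerate(Cx_list_1) if x > minX_2 and x < maxX_2]
--     Cy_list_2, Cx_list_2, all_text_2 = [], [], []
--     for k in filtered_elements_index:
--         Cy_list_2.append(Cy_list_1[k])
--         Cx_list_2.append(Cx_list_1[k])
--         all_text_2.append(all_text_1[k])
--
--     return all_text_2
-- ===== SOURCE B (Python) =====
-- cell_height = 160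
--
-- consignee_width = 435
--
-- pro_num_width = 320
--
-- def getCells(Cy_list, Cx_list, all_text, consignee_x, consignee_y, props="consignee"):
--     minY, maxY = consignee_y, consignee_y + cell_height - 10
--     if props == "pronumber":
--         minX_2 = consignee_x - 100 + consignee_width
--         maxX_2 = minX_2 + pro_num_width
--     else:
--         minX_2 = consignee_x - 100
--         maxX_2 = minX_2 + consignee_width
--     result = []
--     for k, cy in enumerate(Cy_list):
--         if minY < cy < maxY and minX_2 < Cx_list[k] < maxX_2:
--             result.append(all_text[k])
--     return result
-- ===== Notes on version B (the rewrite author's own statement) =====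
-- stated objective: simpler
-- what changed: Replaces A's two sequential index-filter passes and the three intermediate parallel lists (Cy_list_1/Cx_list_1/all_text_1 and the _2 triple) by a single enumerate loop that tests the combined Y-and-X predicate and appends the matching text directly.
import Mathlib
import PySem

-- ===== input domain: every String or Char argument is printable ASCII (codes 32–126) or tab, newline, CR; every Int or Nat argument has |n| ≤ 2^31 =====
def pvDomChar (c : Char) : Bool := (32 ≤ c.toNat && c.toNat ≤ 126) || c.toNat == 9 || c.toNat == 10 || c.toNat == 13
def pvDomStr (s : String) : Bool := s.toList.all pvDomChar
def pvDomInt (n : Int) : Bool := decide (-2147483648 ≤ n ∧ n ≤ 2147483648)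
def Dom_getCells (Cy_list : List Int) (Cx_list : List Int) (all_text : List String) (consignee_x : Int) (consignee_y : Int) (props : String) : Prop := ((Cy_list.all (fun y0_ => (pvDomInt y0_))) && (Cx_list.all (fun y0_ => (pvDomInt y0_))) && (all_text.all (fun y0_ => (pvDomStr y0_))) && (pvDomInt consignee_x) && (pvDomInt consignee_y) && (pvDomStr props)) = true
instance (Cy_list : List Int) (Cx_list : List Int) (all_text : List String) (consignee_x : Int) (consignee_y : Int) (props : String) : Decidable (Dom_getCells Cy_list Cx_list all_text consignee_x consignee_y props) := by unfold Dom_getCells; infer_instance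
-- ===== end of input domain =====

-- B replaces A's two sequential index-filter passes and three intermediate parallel lists by a
-- single enumerate loop with the combined Y-and-X predicate (objective: simpler; same O(n) cost).

-- ===== PORT A =====
def getCells (Cy_list : List Int) (Cx_list : List Int) (all_text : List String) (consignee_x : Int) (consignee_y : Int) (props : String) : List String :=
  let minY := consignee_y
  let maxY := consignee_y + 160 - 10
  let mm : Int × Int :=
    if props == "pronumber" then
      (consignee_x - 100 + 435, consignee_x - 100 + 435 + 320)
    else
      (consignee_x - 100, consignee_x - 100 + 435)
  let fidx1 := ((PySem.List.enumerate Cy_list 0).filter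
      (fun p => decide (p.2 > minY) && decide (p.2 < maxY))).map (fun p => p.1)
  let s1 := fidx1.foldl (fun (acc : List Int × List Int × List String) k =>
      (acc.1 ++ [PySem.List.pyGetD Cy_list k 0],
       acc.2.1 ++ [PySem.List.pyGetD Cx_list k 0],
       acc.2.2 ++ [PySem.List.pyGetD all_text k ""])) ([], [], [])
  let fidx2 := ((PySem.List.enumerate s1.2.1 0).filter
      (fun p => decide (p.2 > mm.1) && decide (p.2 < mm.2))).map (fun p => p.1)
  let s2 := fidx2.foldl (fun (acc : List Int × List Int × List String) k =>
      (acc.1 ++ [PySem.List.pyGetD s1.1 k 0],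
       acc.2.1 ++ [PySem.List.pyGetD s1.2.1 k 0],
       acc.2.2 ++ [PySem.List.pyGetD s1.2.2 k ""])) ([], [], [])
  s2.2.2

-- ===== PORT B =====
def altGo (Cx : List Int) (texts : List String) (minY maxY minX maxX : Int) : Nat → List Int → List String
  | _, [] => []
  | k, cy :: rest =>
    if minY < cy ∧ cy < maxY ∧ minX < PySem.List.pyGetD Cx (k : Int) 0 ∧ PySem.List.pyGetD Cx (k : Int) 0 < maxX then
      PySem.List.pyGetD texts (k : Int) "" :: altGo Cx texts minY maxY minX maxX (k + 1) rest
    else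
      altGo Cx texts minY maxY minX maxX (k + 1) rest

def getCells_alt (Cy_list : List Int) (Cx_list : List Int) (all_text : List String) (consignee_x : Int) (consignee_y : Int) (props : String) : List String :=
  let minY := consignee_y
  let maxY := consignee_y + 160 - 10
  let mm : Int × Int :=
    if props == "pronumber" then
      (consignee_x - 100 + 435, consignee_x - 100 + 435 + 320)
    else
      (consignee_x - 100, consignee_x - 100 + 435)
  altGo Cx_list all_text minY maxY mm.1 mm.2 0 Cy_list

-- ===== PRECONDITION & SPEC =====
-- Pre_ excludes exactly the inputs on which the Python A raises IndexError: a position whose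
-- Cy value passes the Y filter but which is out of range for Cx_list or all_text.
def Pre_getCells (Cy_list : List Int) (Cx_list : List Int) (all_text : List String) (consignee_x : Int) (consignee_y : Int) (props : String) : Prop :=
  ∀ k, k < Cy_list.length →
    (consignee_y < Cy_list.getD k 0 ∧ Cy_list.getD k 0 < consignee_y + 150) →
    (k < Cx_list.length ∧ k < all_text.length)
instance (Cy_list : List Int) (Cx_list : List Int) (all_text : List String) (consignee_x : Int) (consignee_y : Int) (props : String) : Decidable (Pre_getCells Cy_list Cx_list all_text consignee_x consignee_y props) := by unfold Pre_getCells; infer_instance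

def pvWitness_getCells : List Int × List Int × List String × Int × Int × String :=
  ([40, 300], [400, 500], ["a", "b"], 450, 30, "consignee")

def Spec_getCells (Cy_list : List Int) (Cx_list : List Int) (all_text : List String) (consignee_x : Int) (consignee_y : Int) (props : String) (out : List String) : Prop := out = getCells_alt Cy_list Cx_list all_text consignee_x consignee_y props
instance (Cy_list : List Int) (Cx_list : List Int) (all_text : List String) (consignee_x : Int) (consignee_y : Int) (props : String) (out : List String) : Decidable (Spec_getCells Cy_list Cx_list all_text consignee_x consignee_y props out) := by unfold Spec_getCells; infer_instance

-- ===== CLAIM (what is proved, stated in full; the proofs are below) =====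
def Claim_equal_getCells : Prop := ∀ (Cy_list : List Int) (Cx_list : List Int) (all_text : List String) (consignee_x : Int) (consignee_y : Int) (props : String), Dom_getCells Cy_list Cx_list all_text consignee_x consignee_y props → Pre_getCells Cy_list Cx_list all_text consignee_x consignee_y props → Spec_getCells Cy_list Cx_list all_text consignee_x consignee_y props (getCells Cy_list Cx_list all_text consignee_x consignee_y props)

-- ===== LEMMAS AND PROOFS =====

-- A's append-one-element triple loop builds three maps.
theorem foldl_triple (g1 g2 : Int → Int) (g3 : Int → String) :
    ∀ (F : List Int) (a b : List Int) (c : List String),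
      F.foldl (fun (acc : List Int × List Int × List String) k =>
          (acc.1 ++ [g1 k], acc.2.1 ++ [g2 k], acc.2.2 ++ [g3 k])) (a, b, c)
        = (a ++ F.map g1, b ++ F.map g2, c ++ F.map g3) := by
  intro F
  induction F with
  | nil => intro a b c; simp
  | cons k F ih =>
      intro a b c
      simp only [List.foldl_cons, List.map_cons, ih, List.append_assoc, List.singleton_append]

-- Filtering an enumeration and reading a parallel list back by index is a zip-filter.
theorem enum_filter_getD (Q : Int → Bool) (d : String) :
    ∀ (L : List Int) (T : List String) (s : Nat), s + L.length ≤ T.length →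
      ((PySem.List.enumerate L (s : Int)).filter (fun p => Q p.2)).map
          (fun p => PySem.List.pyGetD T p.1 d)
        = ((L.zip (T.drop s)).filter (fun p => Q p.1)).map (fun p => p.2) := by
  intro L
  induction L with
  | nil => intro T s _; simp [PySem.List.enumerate_nil]
  | cons x L ih =>
      intro T s hlen
      have hs : s < T.length := by simp at hlen; omega
      have hdrop : T.drop s = T[s] :: T.drop (s + 1) := List.drop_eq_getElem_cons hs
      have hget : PySem.List.pyGetD T (s : Int) d = T[s] := by
        simp [PySem.List.pyGetD_natCast, List.getD_eq_getElem?_getD, hs]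
      have hcast : (s : Int) + 1 = ((s + 1 : Nat) : Int) := by push_cast; ring
      rw [PySem.List.enumerate_cons, hdrop]
      by_cases hq : Q x = true
      · simp only [List.zip_cons_cons, List.filter_cons, hq, if_true, List.map_cons, hget, hcast,
          ih T (s + 1) (by simp at hlen ⊢; omega)]
      · simp only [List.zip_cons_cons, List.filter_cons, hq, Bool.false_eq_true, if_false, hcast,
          ih T (s + 1) (by simp at hlen ⊢; omega)]

-- B's loop is a filter-map over the enumeration.
theorem altGo_spec (Cx : List Int) (T : List String) (minY maxY minX maxX : Int) :
    ∀ (L : List Int) (s : Nat),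
      altGo Cx T minY maxY minX maxX s L
        = ((PySem.List.enumerate L (s : Int)).filter
            (fun p => (decide (p.2 > minY) && decide (p.2 < maxY)) &&
                      (decide (minX < PySem.List.pyGetD Cx p.1 0) && decide (PySem.List.pyGetD Cx p.1 0 < maxX)))).map
            (fun p => PySem.List.pyGetD T p.1 "") := by
  intro L
  induction L with
  | nil => intro s; simp [altGo, PySem.List.enumerate_nil]
  | cons x L ih =>
      intro s
      have hcast : (s : Int) + 1 = ((s + 1 : Nat) : Int) := by push_cast; ring
      rw [PySem.List.enumerate_cons, hcast]
      by_cases h : minY < x ∧ x < maxY ∧ minX < PySem.List.pyGetD Cx (s : Int) 0 ∧ PySem.List.pyGetD Cx (s : Int) 0 < maxX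
      · simp only [altGo, if_pos h, List.filter_cons]
        have ht : (((x > minY) ∧ (x < maxY)) ∧
            (minX < PySem.List.pyGetD Cx (s : Int) 0 ∧ PySem.List.pyGetD Cx (s : Int) 0 < maxX)) := by
          exact ⟨⟨h.1, h.2.1⟩, h.2.2.1, h.2.2.2⟩
        rw [show ((decide (x > minY) && decide (x < maxY)) &&
            (decide (minX < PySem.List.pyGetD Cx (s : Int) 0) && decide (PySem.List.pyGetD Cx (s : Int) 0 < maxX))) = true by
          simp only [← Bool.decide_and]; exact decide_eq_true ht]
        simp only [if_true, List.map_cons, ih]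
      · simp only [altGo, if_neg h, List.filter_cons]
        have hf : ¬ (((x > minY) ∧ (x < maxY)) ∧
            (minX < PySem.List.pyGetD Cx (s : Int) 0 ∧ PySem.List.pyGetD Cx (s : Int) 0 < maxX)) := by
          intro hc; exact h ⟨hc.1.1, hc.1.2, hc.2.1, hc.2.2⟩
        rw [show ((decide (x > minY) && decide (x < maxY)) &&
            (decide (minX < PySem.List.pyGetD Cx (s : Int) 0) && decide (PySem.List.pyGetD Cx (s : Int) 0 < maxX))) = false by
          simp only [← Bool.decide_and]; exact decide_eq_false hf]
        simp only [Bool.false_eq_true, if_false, ih]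

-- The whole of A's two-stage pipeline, for fixed bounds, equals B's single loop.
theorem stages_eq (Cy Cx : List Int) (T : List String) (minY maxY minX maxX : Int) :
    (let fidx1 := ((PySem.List.enumerate Cy 0).filter
        (fun p => decide (p.2 > minY) && decide (p.2 < maxY))).map (fun p => p.1)
     let s1 := fidx1.foldl (fun (acc : List Int × List Int × List String) k =>
        (acc.1 ++ [PySem.List.pyGetD Cy k 0],
         acc.2.1 ++ [PySem.List.pyGetD Cx k 0],
         acc.2.2 ++ [PySem.List.pyGetD T k ""])) ([], [], [])
     let fidx2 := ((PySem.List.enumerate s1.2.1 0).filter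
        (fun p => decide (p.2 > minX) && decide (p.2 < maxX))).map (fun p => p.1)
     let s2 := fidx2.foldl (fun (acc : List Int × List Int × List String) k =>
        (acc.1 ++ [PySem.List.pyGetD s1.1 k 0],
         acc.2.1 ++ [PySem.List.pyGetD s1.2.1 k 0],
         acc.2.2 ++ [PySem.List.pyGetD s1.2.2 k ""])) ([], [], [])
     s2.2.2)
    = altGo Cx T minY maxY minX maxX 0 Cy := by
  rw [altGo_spec]
  simp only [Nat.cast_zero, foldl_triple, List.nil_append, List.map_map, Function.comp_def]
  have he := enum_filter_getD (fun x => decide (x > minX) && decide (x < maxX)) ""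
      (((PySem.List.enumerate Cy 0).filter
          (fun p => decide (p.2 > minY) && decide (p.2 < maxY))).map
        (fun x => PySem.List.pyGetD Cx x.1 0))
      (((PySem.List.enumerate Cy 0).filter
          (fun p => decide (p.2 > minY) && decide (p.2 < maxY))).map
        (fun x => PySem.List.pyGetD T x.1 ""))
      0 (by simp)
  simp only [Nat.cast_zero, List.drop_zero] at he
  rw [he, List.zip_map']
  simp only [List.filter_map, List.map_map, List.filter_filter, Function.comp_def, gt_iff_lt]
  exact congrArg _ (List.filter_congr (fun a _ => Bool.and_comm _ _))

-- ===== VERDICT (by name: the statement is the Claim_ definition above) =====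
theorem getCells_spec : Claim_equal_getCells := by
  intro Cy Cx T cx cy props _ _
  unfold Spec_getCells
  cases hp : (props == "pronumber") with
  | true =>
      simp only [getCells, getCells_alt, hp, if_true]
      exact stages_eq Cy Cx T cy (cy + 160 - 10) (cx - 100 + 435) (cx - 100 + 435 + 320)
  | false =>
      simp only [getCells, getCells_alt, hp, Bool.false_eq_true, if_false]
      exact stages_eq Cy Cx T cy (cy + 160 - 10) (cx - 100) (cx - 100 + 435)
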